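-- pv_equiv track=rewrite | github.com/BrandonCkf/Securite-Informatique-Chiffrement | transRect.py | rangCleTransRect
-- ===== SOURCE A (Python) =====
-- def rangCleTransRect(key):
--     # Liste des caractères de la clé
--     l = list(key)
--
--     # Liste des caractères de la clé triées dans l'ordre alphabétique
--     lt = l.copy()
--     lt.sort()
--
--     # Rang du prochain caractères si il existe
--     i = 1
--
--     # On parcours la liste triée et pour chaque caractères, on le remplace par son rang à sa position dans la liste initiale
--     for c in lt:
--         l[l.index(c)] = i
--         i += 1
--
--     return l
-- ===== SOURCE B (Python) =====
-- def rangCleTransRect(key):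
--     # Counting rank assignment: one pass to count characters, ranks of the
--     # distinct characters computed from the sorted counts, one pass to emit
--     # each position's rank (equal characters ranked left to right).
--     counts = {}
--     for c in key:
--         counts[c] = counts.get(c, 0) + 1
--     base = {}
--     total = 0
--     for c in sorted(counts):
--         base[c] = total + 1
--         total += counts[c]
--     res = []
--     seen = {}
--     for c in key:
--         k = seen.get(c, 0)
--         res.append(base[c] + k)
--         seen[c] = k + 1
--     return res
-- ===== Notes on version B (the rewrite author's own statement) =====
-- stated objective: faster
-- what changed: A sorts the key and then, for each sorted character, linearly searches a mutable mixed list for its first remaining occurrence to overwrite it with the next rank; B makes one counting pass (a Counter dict), computes each distinct character's base rank from the sorted distinct characters, and emits all ranks in a single final pass that tracks how many equal characters were already ranked, with no quadratic search and no mixed-list mutation.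
import Mathlib
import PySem

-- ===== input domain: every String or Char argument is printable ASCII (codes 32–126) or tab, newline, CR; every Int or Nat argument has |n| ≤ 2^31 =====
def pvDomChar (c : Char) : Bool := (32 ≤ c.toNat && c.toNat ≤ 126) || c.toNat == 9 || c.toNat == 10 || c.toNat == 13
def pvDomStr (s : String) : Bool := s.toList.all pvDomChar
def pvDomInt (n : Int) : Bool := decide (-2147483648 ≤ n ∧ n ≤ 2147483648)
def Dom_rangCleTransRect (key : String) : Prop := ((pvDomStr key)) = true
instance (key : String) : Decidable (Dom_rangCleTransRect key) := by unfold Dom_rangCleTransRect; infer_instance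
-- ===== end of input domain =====

-- B replaces A's quadratic sort-then-destructive-search with counting dicts:
-- base rank per distinct character plus a running count of equal characters seen.


-- ===== PORT A =====
-- A's working list holds characters progressively overwritten by integer ranks;
-- the mixed char/int Python list is modelled as List (Char ⊕ Int).
-- 'l[l.index(c)] = i' : the 'none' branch is a totality guard only (Python's
-- ValueError cannot occur, since lt is a permutation of the remaining chars).
def pvReplaceFirst (l : List (Char ⊕ Int)) (c : Char) (i : Int) : List (Char ⊕ Int) :=
  match PySem.List.index? l (Sum.inl c) with
  | some p => l.set p (Sum.inr i)
  | none => l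

def rangCleTransRect (key : String) : List Int :=
  let l : List (Char ⊕ Int) := key.toList.map Sum.inl
  let lt := PySem.List.sorted key.toList (fun c => c) false
  let st := lt.foldl (fun (st : List (Char ⊕ Int) × Int) c =>
    (pvReplaceFirst st.1 c st.2, st.2 + 1)) (l, 1)
  -- by the end of the loop every entry is an int; the inl branch is unreachable
  st.1.map (fun e => match e with | Sum.inl _ => 0 | Sum.inr n => n)

-- ===== PORT B =====
-- 'base[c]' and 'counts[c]' are exact lookups that cannot raise (c is always a
-- key); they are ported as getD with an unreachable default.
def rangCleTransRect_alt (key : String) : List Int :=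
  let counts : PySem.Dict Char Int :=
    key.toList.foldl (fun d c => d.insert c (d.getD c 0 + 1)) PySem.Dict.empty
  let bt : PySem.Dict Char Int × Int :=
    (PySem.List.sorted counts.keys (fun c => c) false).foldl
      (fun st c => (st.1.insert c (st.2 + 1), st.2 + counts.getD c 0))
      (PySem.Dict.empty, 0)
  let rs : List Int × PySem.Dict Char Int :=
    key.toList.foldl (fun st c =>
      (st.1 ++ [bt.1.getD c 0 + st.2.getD c 0], st.2.insert c (st.2.getD c 0 + 1)))
      ([], PySem.Dict.empty)
  rs.1

-- ===== PRECONDITION & SPEC =====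
def Spec_rangCleTransRect (key : String) (out : List Int) : Prop := out = rangCleTransRect_alt key
instance (key : String) (out : List Int) : Decidable (Spec_rangCleTransRect key out) := by unfold Spec_rangCleTransRect; infer_instance

-- ===== CLAIM (what is proved, stated in full; the proofs are below) =====
def Claim_equal_rangCleTransRect : Prop := ∀ (key : String), Dom_rangCleTransRect key → Spec_rangCleTransRect key (rangCleTransRect key)

-- ===== LEMMAS AND PROOFS =====

-- number of characters of cs strictly below c
def pvCntLt (cs : List Char) (c : Char) : Nat := cs.countP (fun d => decide (d < c))

-- stable 0-based rank of position p in cs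
def pvRk (cs : List Char) (p : Nat) : Nat :=
  pvCntLt cs (cs.getD p 'a') + (cs.take p).count (cs.getD p 'a')

-- the intermediate state of A's loop after k steps
def pvMix (cs : List Char) (k : Nat) : List (Char ⊕ Int) :=
  (List.range cs.length).map (fun p =>
    if pvRk cs p < k then Sum.inr ((pvRk cs p : Int) + 1) else Sum.inl (cs.getD p 'a'))

-- index of the (m+1)-th occurrence of c in cs
def pvNthOcc : List Char → Char → Nat → Nat
  | [], _, _ => 0
  | d :: cs, c, m =>
    if d = c then (if m = 0 then 0 else pvNthOcc cs c (m - 1) + 1)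
    else pvNthOcc cs c m + 1

lemma pvNthOcc_spec (c : Char) : ∀ (cs : List Char) (m : Nat), m < cs.count c →
    pvNthOcc cs c m < cs.length ∧ cs.getD (pvNthOcc cs c m) 'a' = c ∧
      (cs.take (pvNthOcc cs c m)).count c = m := by
  intro cs
  induction cs with
  | nil => intro m hm; simp at hm
  | cons d cs ih =>
    intro m hm
    by_cases hd : d = c
    · subst hd
      by_cases hm0 : m = 0
      · subst hm0; simp [pvNthOcc]
      · simp only [List.count_cons_self] at hm
        obtain ⟨h1, h2, h3⟩ := ih (m - 1) (by omega)
        simp only [pvNthOcc, if_true]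
        rw [if_neg hm0]
        refine ⟨by simp; omega, by simpa using h2, ?_⟩
        rw [List.take_succ_cons, List.count_cons_self]
        omega
    · rw [List.count_cons_of_ne hd] at hm
      obtain ⟨h1, h2, h3⟩ := ih m hm
      simp only [pvNthOcc, if_neg hd]
      refine ⟨by simp; omega, by simpa using h2, ?_⟩
      rw [List.take_succ_cons, List.count_cons_of_ne hd]
      exact h3

lemma pvNthOcc_uniq (c : Char) : ∀ (cs : List Char) (p m : Nat), p < cs.length →
    cs.getD p 'a' = c → (cs.take p).count c = m → p = pvNthOcc cs c m := by
  intro cs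
  induction cs with
  | nil => intro p m hp; simp at hp
  | cons d cs ih =>
    intro p m hp hg ht
    match p with
    | 0 =>
      simp at hg
      subst hg
      simp at ht
      simp [pvNthOcc, ← ht]
    | p + 1 =>
      simp at hp
      simp only [List.getD_cons_succ] at hg
      by_cases hd : d = c
      · subst hd
        rw [List.take_succ_cons, List.count_cons_self] at ht
        have hm0 : m ≠ 0 := by omega
        simp only [pvNthOcc, if_true]
        rw [if_neg hm0]
        have := ih p (m - 1) hp hg (by omega)
        omega
      · rw [List.take_succ_cons, List.count_cons_of_ne hd] at ht
        simp only [pvNthOcc, if_neg hd]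
        have := ih p m hp hg ht
        omega

lemma pvTakeCount_mono (cs : List Char) (c : Char) {p q : Nat} (h : p ≤ q) :
    (cs.take p).count c ≤ (cs.take q).count c := by
  have : cs.take p = (cs.take q).take p := by rw [List.take_take, Nat.min_eq_left h]
  rw [this]
  exact (List.take_sublist _ _).count_le _

lemma pvSelfCount (cs : List Char) (p : Nat) (hp : p < cs.length) :
    (cs.take p).count (cs.getD p 'a') < cs.count (cs.getD p 'a') := by
  set c := cs.getD p 'a' with hc
  have hsplit : cs = cs.take p ++ cs.drop p := (List.take_append_drop p cs).symm
  have hdrop : cs.drop p = c :: cs.drop (p + 1) := by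
    rw [List.drop_eq_getElem_cons hp, hc, List.getD_eq_getElem cs 'a' hp]
  conv_rhs => rw [hsplit]
  rw [List.count_append, hdrop, List.count_cons_self]
  omega

lemma pvCntLe_le (cs : List Char) (c : Char) : pvCntLt cs c + cs.count c ≤ cs.length := by
  induction cs with
  | nil => simp [pvCntLt]
  | cons d cs ih =>
    simp only [pvCntLt, List.countP_cons, List.count_cons, List.length_cons] at *
    by_cases h2 : c = d
    · subst h2
      simp [lt_irrefl]
      omega
    · have h2' : ¬ d = c := fun he => h2 he.symm
      by_cases h1 : d < c <;> simp [h1, h2'] <;> omega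

lemma pvCnt_mono (cs : List Char) {c c' : Char} (h : c < c') :
    pvCntLt cs c + cs.count c ≤ pvCntLt cs c' := by
  induction cs with
  | nil => simp [pvCntLt]
  | cons d cs ih =>
    simp only [pvCntLt, List.countP_cons, List.count_cons] at *
    by_cases h2 : c = d
    · subst h2
      simp [lt_irrefl, h]
      omega
    · have h2' : ¬ d = c := fun he => h2 he.symm
      by_cases h1 : d < c
      · have h3 : d < c' := h1.trans h
        simp [h1, h2', h3]
        omega
      · by_cases h3 : d < c' <;> simp [h1, h2', h3] <;> omega

lemma pvRk_lt_len (cs : List Char) (p : Nat) (hp : p < cs.length) : pvRk cs p < cs.length := by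
  have h1 := pvSelfCount cs p hp
  have h2 := pvCntLe_le cs (cs.getD p 'a')
  unfold pvRk
  omega

lemma pvRk_uniq (cs : List Char) (p q : Nat) (hp : p < cs.length) (hq : q < cs.length)
    (h : pvRk cs p = pvRk cs q) : p = q := by
  unfold pvRk at h
  rcases lt_trichotomy (cs.getD p 'a') (cs.getD q 'a') with hlt | heq | hgt
  · have h1 := pvSelfCount cs p hp
    have h2 := pvCnt_mono cs hlt
    omega
  · rw [heq] at h
    have h3 : (cs.take p).count (cs.getD q 'a') = (cs.take q).count (cs.getD q 'a') := by omega
    have ep := pvNthOcc_uniq (cs.getD q 'a') cs p _ hp heq h3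
    have eq := pvNthOcc_uniq (cs.getD q 'a') cs q _ hq rfl rfl
    exact ep.trans eq.symm
  · have h1 := pvSelfCount cs q hq
    have h2 := pvCnt_mono cs hgt
    omega

lemma pvPwBounds : ∀ (s : List Char), s.Pairwise (fun a b => a ≤ b) → ∀ k, k < s.length →
    s.countP (fun d => decide (d < s.getD k 'a')) ≤ k ∧
      k < s.countP (fun d => decide (d < s.getD k 'a')) + s.count (s.getD k 'a') := by
  intro s
  induction s with
  | nil => intro _ k hk; simp at hk
  | cons d t ih =>
    intro hpw k hk
    have hall : ∀ x ∈ t, d ≤ x := fun x hx => (List.pairwise_cons.mp hpw).1 x hx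
    have hpw' : t.Pairwise (fun a b => a ≤ b) := (List.pairwise_cons.mp hpw).2
    match k with
    | 0 =>
      simp only [List.getD_cons_zero, List.countP_cons, List.count_cons_self]
      have hz : t.countP (fun x => decide (x < d)) = 0 := by
        rw [List.countP_eq_zero]
        intro x hx
        simpa using not_lt.mpr (hall x hx)
      simp [hz]
    | k + 1 =>
      simp only [List.length_cons] at hk
      obtain ⟨i1, i2⟩ := ih hpw' k (by omega)
      have hmem : t.getD k 'a' ∈ t := by
        rw [List.getD_eq_getElem t 'a' (by omega)]
        exact List.getElem_mem _
      have hdc : d ≤ t.getD k 'a' := hall _ hmem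
      simp only [List.getD_cons_succ, List.countP_cons, List.count_cons,
        decide_eq_true_eq, beq_iff_eq, List.length_cons]
      constructor
      · split_ifs <;> omega
      · rcases lt_or_eq_of_le hdc with hlt | heq
        · rw [if_pos hlt, if_neg (ne_of_lt hlt)]
          omega
        · have hnd : ¬ d < t.getD k 'a' := by rw [heq]; exact lt_irrefl _
          rw [if_neg hnd, if_pos heq]
          omega

lemma pvSortedBounds (cs : List Char) (k : Nat)
    (hk : k < (PySem.List.sorted cs (fun c => c) false).length) :
    pvCntLt cs ((PySem.List.sorted cs (fun c => c) false).getD k 'a') ≤ k ∧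
      k < pvCntLt cs ((PySem.List.sorted cs (fun c => c) false).getD k 'a') +
        cs.count ((PySem.List.sorted cs (fun c => c) false).getD k 'a') := by
  have hperm : (PySem.List.sorted cs (fun c => c) false).Perm cs := PySem.List.sorted_perm cs _ _
  have hpw : (PySem.List.sorted cs (fun c => c) false).Pairwise (fun a b => a ≤ b) :=
    PySem.List.sorted_pairwise cs _
  unfold pvCntLt
  rw [← hperm.countP_eq, ← hperm.count_eq]
  exact pvPwBounds _ hpw k hk

lemma pvIndex?_eq_some {α : Type} [BEq α] [LawfulBEq α] (x : α) :
    ∀ (l : List α) (p : Nat) (hp : p < l.length), l[p] = x →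
      (∀ j (hj : j < p), l[j]'(by omega) ≠ x) → PySem.List.index? l x = some p := by
  intro l
  induction l with
  | nil => intro p hp; simp at hp
  | cons a t ih =>
    intro p hp hx hmin
    match p with
    | 0 =>
      simp at hx
      subst hx
      exact PySem.List.index?_cons_self a t
    | p + 1 =>
      have hax : a ≠ x := by simpa using hmin 0 (by omega)
      rw [PySem.List.index?_cons_of_ne t hax]
      rw [ih p (by simpa using hp) (by simpa using hx)
        (fun j hj => by simpa using hmin (j + 1) (by omega))]
      rfl

lemma pvStep (cs : List Char) (k : Nat) (hk : k < cs.length) :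
    pvReplaceFirst (pvMix cs k) ((PySem.List.sorted cs (fun c => c) false).getD k 'a') ((k : Int) + 1)
      = pvMix cs (k + 1) := by
  have hslen : (PySem.List.sorted cs (fun c => c) false).length = cs.length :=
    PySem.List.length_sorted cs _ _
  set c := (PySem.List.sorted cs (fun c => c) false).getD k 'a' with hc
  obtain ⟨hlo, hhi⟩ := pvSortedBounds cs k (by omega)
  rw [← hc] at hlo hhi
  set m := k - pvCntLt cs c with hm
  obtain ⟨hplen, hpc, hpcount⟩ := pvNthOcc_spec c cs m (by omega)
  set P := pvNthOcc cs c m with hP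
  have hrk : pvRk cs P = k := by unfold pvRk; rw [hpc, hpcount]; omega
  have hmixlen : (pvMix cs k).length = cs.length := by simp [pvMix]
  have hmixget : ∀ (j : Nat) (hj : j < cs.length),
      (pvMix cs k)[j]'(by simpa [pvMix] using hj)
        = if pvRk cs j < k then Sum.inr ((pvRk cs j : Int) + 1) else Sum.inl (cs.getD j 'a') := by
    intro j hj
    simp [pvMix]
  haveI : ReflBEq (Char ⊕ Int) := ⟨by intro a; cases a <;> simp [BEq.beq, Sum.instBEq.beq]⟩
  haveI : LawfulBEq (Char ⊕ Int) :=
    ⟨by intro a b h; cases a <;> cases b <;> simp_all [BEq.beq, Sum.instBEq.beq]⟩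
  have hidx : PySem.List.index? (pvMix cs k) (Sum.inl c) = some P := by
    apply pvIndex?_eq_some
    · rw [hmixget P hplen]
      rw [if_neg (by omega), hpc]
    · intro j hj
      rw [hmixget j (by omega)]
      split
      · simp
      · rename_i hrkj
        simp only [ne_eq, Sum.inl.injEq]
        intro hjc
        have h1 : (cs.take j).count c ≤ (cs.take P).count c :=
          pvTakeCount_mono cs c (le_of_lt hj)
        have h2 : pvRk cs j = pvCntLt cs c + (cs.take j).count c := by
          unfold pvRk; rw [hjc]
        have h3 : (cs.take j).count c = m := by omega
        have := pvNthOcc_uniq c cs j m (by omega) hjc h3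
        omega
  unfold pvReplaceFirst
  rw [hidx]
  apply List.ext_getElem
  · simp [pvMix]
  intro i h1 h2
  rw [List.getElem_set]
  have hi : i < cs.length := by simpa [pvMix] using h2
  rw [hmixget i hi]
  have hmix1get : (pvMix cs (k + 1))[i]'h2
      = if pvRk cs i < k + 1 then Sum.inr ((pvRk cs i : Int) + 1) else Sum.inl (cs.getD i 'a') := by
    simp [pvMix]
  rw [hmix1get]
  by_cases hiP : P = i
  · subst hiP
    rw [if_pos rfl, if_pos (by omega), hrk]
  · have hne : pvRk cs i ≠ k := fun hcontra => by
      have := pvRk_uniq cs i P hi hplen (by rw [hrk, hcontra])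
      exact hiP this.symm
    rw [if_neg hiP]
    by_cases hlt : pvRk cs i < k
    · rw [if_pos hlt, if_pos (by omega)]
    · rw [if_neg hlt, if_neg (by omega)]

lemma pvFold (cs : List Char) : ∀ (k : Nat), k ≤ cs.length →
    ((PySem.List.sorted cs (fun c => c) false).take k).foldl
      (fun (st : List (Char ⊕ Int) × Int) c => (pvReplaceFirst st.1 c st.2, st.2 + 1))
      (cs.map Sum.inl, 1) = (pvMix cs k, (k : Int) + 1) := by
  have hslen : (PySem.List.sorted cs (fun c => c) false).length = cs.length :=
    PySem.List.length_sorted cs _ _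
  intro k
  induction k with
  | zero =>
    intro _
    simp only [List.take_zero, List.foldl_nil]
    have hmix0 : pvMix cs 0 = cs.map Sum.inl := by
      apply List.ext_getElem
      · simp [pvMix]
      intro i h1 h2
      have hi : i < cs.length := by simpa [pvMix] using h1
      simp [pvMix, List.getElem?_eq_getElem hi]
    rw [hmix0]
    norm_num
  | succ k ih =>
    intro hk1
    have hk : k < cs.length := by omega
    have htake : (PySem.List.sorted cs (fun c => c) false).take (k + 1)
        = (PySem.List.sorted cs (fun c => c) false).take k
          ++ [(PySem.List.sorted cs (fun c => c) false).getD k 'a'] := by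
      rw [List.take_succ, List.getElem?_eq_getElem (by omega),
        List.getD_eq_getElem _ 'a' (by omega)]
      rfl
    rw [htake, List.foldl_append, ih (by omega)]
    simp only [List.foldl_cons, List.foldl_nil]
    rw [pvStep cs k hk]
    refine Prod.ext rfl ?_
    push_cast
    ring

lemma pvBaseFold (g : Char → Int) (x : Char) : ∀ (l : List Char) (d : PySem.Dict Char Int)
    (t : Int), l.Pairwise (· < ·) →
    (l.foldl (fun st c => (st.1.insert c (st.2 + 1), st.2 + g c)) (d, t)).1.getD x 0
      = if x ∈ l then t + ((l.filter (fun c => decide (c < x))).map g).sum + 1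
        else d.getD x 0 := by
  intro l
  induction l with
  | nil => intro d t _; simp
  | cons c l ih =>
    intro d t hpw
    have hall : ∀ y ∈ l, c < y := fun y hy => (List.pairwise_cons.mp hpw).1 y hy
    rw [List.foldl_cons, ih _ _ (List.pairwise_cons.mp hpw).2]
    by_cases hxc : x = c
    · subst hxc
      have hnm : x ∉ l := fun hm => absurd (hall x hm) (lt_irrefl x)
      have hfilt : l.filter (fun c => decide (c < x)) = [] := by
        rw [List.filter_eq_nil_iff]
        intro y hy
        simpa using asymm (hall y hy)
      rw [if_neg hnm, if_pos (List.mem_cons_self), PySem.Dict.getD_insert_self]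
      simp [hfilt, lt_irrefl]
    · by_cases hxl : x ∈ l
      · have hcx : c < x := hall x hxl
        rw [if_pos hxl, if_pos (List.mem_cons_of_mem c hxl), List.filter_cons,
          if_pos (by simpa using hcx)]
        simp only [List.map_cons, List.sum_cons]
        ring
      · have hnotin : x ∉ c :: l := by
          rw [List.mem_cons]
          rintro (h | h)
          exacts [hxc h, hxl h]
        rw [if_neg hxl, if_neg hnotin, PySem.Dict.getD_insert_of_ne _ _ _ hxc]

lemma pvSumCounts (x : Char) : ∀ (cs l : List Char), l.Nodup →
    (∀ e ∈ cs, e < x → e ∈ l) →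
    ((l.filter (fun c => decide (c < x))).map (fun c => (cs.count c : Int))).sum
      = (cs.countP (fun d => decide (d < x)) : Int) := by
  intro cs
  induction cs with
  | nil =>
    intro l _ _
    rw [List.sum_eq_zero]
    · simp
    · intro y hy
      simp only [List.mem_map] at hy
      obtain ⟨c, _, hc⟩ := hy
      simp [← hc]
  | cons e cs ih =>
    intro l hnd hmem
    have hstep : (l.filter (fun c => decide (c < x))).map (fun c => ((e :: cs).count c : Int))
        = (l.filter (fun c => decide (c < x))).map
            (fun c => (cs.count c : Int) + (if e = c then 1 else 0)) := by
      apply List.map_congr_left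
      intro c _
      rw [List.count_cons]
      simp only [beq_iff_eq]
      split_ifs <;> push_cast <;> ring
    rw [hstep, PySem.List.sum_map_add_int,
      ih l hnd (fun e' he' hlt => hmem e' (List.mem_cons_of_mem e he') hlt)]
    have hind : ((l.filter (fun c => decide (c < x))).map
        (fun c => if e = c then (1 : Int) else 0)).sum
        = ((l.filter (fun c => decide (c < x))).countP (fun c => decide (e = c)) : Int) := by
      rw [show (fun c => if e = c then (1 : Int) else 0)
          = (fun c => if (fun c => decide (e = c)) c = true then (1 : Int) else 0) from by
        funext c
        simp]
      exact PySem.List.sum_map_ite_one_zero _ _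
    rw [hind, List.countP_cons]
    have hndf : (l.filter (fun c => decide (c < x))).Nodup := hnd.filter _
    by_cases hex : e < x
    · have hel : e ∈ l.filter (fun c => decide (c < x)) :=
        List.mem_filter.mpr ⟨hmem e List.mem_cons_self hex, by simpa using hex⟩
      have h1 : (l.filter (fun c => decide (c < x))).countP (fun c => decide (e = c)) = 1 := by
        rw [show (fun c => decide (e = c)) = (· == e) from by
          funext c
          rw [Bool.eq_iff_iff]
          simp only [beq_iff_eq, decide_eq_true_eq]
          exact eq_comm]
        exact List.count_eq_one_of_mem hndf hel
      simp [h1, hex]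
    · have hel : e ∉ l.filter (fun c => decide (c < x)) := by
        intro hm
        exact hex (by simpa using (List.mem_filter.mp hm).2)
      have h1 : (l.filter (fun c => decide (c < x))).countP (fun c => decide (e = c)) = 0 := by
        rw [List.countP_eq_zero]
        intro c hc
        simp only [decide_eq_true_eq]
        intro he
        exact hel (he ▸ hc)
      simp [h1, hex]

lemma pvResFold (Bse : Char → Int) : ∀ (suf pre : List Char) (acc : List Int)
    (seen : PySem.Dict Char Int), (∀ c, seen.getD c 0 = (pre.count c : Int)) →
    (suf.foldl (fun st c =>
        (st.1 ++ [Bse c + st.2.getD c 0], st.2.insert c (st.2.getD c 0 + 1))) (acc, seen)).1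
      = acc ++ (List.range suf.length).map (fun j =>
          Bse (suf.getD j 'a') + ((pre ++ suf.take j).count (suf.getD j 'a') : Int)) := by
  intro suf
  induction suf with
  | nil => intro pre acc seen _; simp
  | cons c suf ih =>
    intro pre acc seen hseen
    rw [List.foldl_cons]
    have hseen' : ∀ x, (seen.insert c (seen.getD c 0 + 1)).getD x 0
        = (((pre ++ [c]).count x : Int)) := by
      intro x
      rw [PySem.Dict.getD_insert, List.count_append, hseen c]
      split_ifs with h
      · subst h
        rw [List.count_cons_self, List.count_nil]
        push_cast
        ring
      · rw [hseen x]
        have hz : [c].count x = 0 := by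
          rw [List.count_eq_zero]
          simp only [List.mem_singleton]
          exact h
        rw [hz]
        push_cast
        ring
    rw [ih (pre ++ [c]) _ _ hseen']
    rw [List.length_cons, List.range_succ_eq_map, List.map_cons, List.map_map]
    have hg0 : Bse ((c :: suf).getD 0 'a')
        + (((pre ++ (c :: suf).take 0).count ((c :: suf).getD 0 'a') : Int))
        = Bse c + seen.getD c 0 := by
      rw [hseen c]
      simp
    have hgs : (List.range suf.length).map ((fun j =>
          Bse ((c :: suf).getD j 'a')
            + ((pre ++ (c :: suf).take j).count ((c :: suf).getD j 'a') : Int)) ∘ (· + 1))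
        = (List.range suf.length).map (fun j =>
          Bse (suf.getD j 'a') + (((pre ++ [c]) ++ suf.take j).count (suf.getD j 'a') : Int)) := by
      apply List.map_congr_left
      intro j _
      simp only [Function.comp_apply, List.getD_cons_succ, List.take_succ_cons,
        List.append_assoc, List.singleton_append]
    rw [hgs, ← hg0]
    simp

lemma pvA_eq (key : String) : rangCleTransRect key =
    (List.range key.toList.length).map (fun p => (pvRk key.toList p : Int) + 1) := by
  simp only [rangCleTransRect]
  have hslen : (PySem.List.sorted key.toList (fun c => c) false).length = key.toList.length :=
    PySem.List.length_sorted key.toList _ _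
  have hfold := pvFold key.toList key.toList.length (le_refl _)
  rw [show (PySem.List.sorted key.toList (fun c => c) false).take key.toList.length
      = PySem.List.sorted key.toList (fun c => c) false from by
    rw [← hslen, List.take_length]] at hfold
  rw [hfold]
  apply List.ext_getElem
  · simp [pvMix]
  intro i h1 h2
  have hi : i < key.toList.length := by simpa [pvMix] using h1
  simp only [List.getElem_map, List.getElem_range]
  have : (pvMix key.toList key.toList.length)[i]'(by simpa [pvMix] using hi)
      = Sum.inr ((pvRk key.toList i : Int) + 1) := by
    simp only [pvMix, List.getElem_map, List.getElem_range]
    rw [if_pos (pvRk_lt_len key.toList i hi)]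
  rw [this]

lemma pvB_eq (key : String) : rangCleTransRect_alt key =
    (List.range key.toList.length).map (fun p => (pvRk key.toList p : Int) + 1) := by
  simp only [rangCleTransRect_alt]
  rw [PySem.Dict.foldl_insert_getD_add_one_eq_counter, PySem.Dict.keys_counter]
  set l := PySem.List.sorted (PySem.Set.ofList key.toList) (fun c => c) false with hl
  have hpw : l.Pairwise (· < ·) := PySem.List.sorted_ofList_pairwise_lt key.toList
  have hnd : l.Nodup := hpw.nodup
  have hmem : ∀ e, e ∈ l ↔ e ∈ key.toList := by
    intro e
    rw [hl, PySem.List.mem_sorted, PySem.Set.mem_ofList]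
  have hbase : ∀ x ∈ key.toList,
      (l.foldl (fun st c => (st.1.insert c (st.2 + 1),
          st.2 + (PySem.Dict.counter key.toList).getD c 0)) (PySem.Dict.empty, 0)).1.getD x 0
        = (key.toList.countP (fun d => decide (d < x)) : Int) + 1 := by
    intro x hx
    rw [pvBaseFold _ x l _ _ hpw, if_pos ((hmem x).mpr hx)]
    have hmap : (l.filter (fun c => decide (c < x))).map
        (fun c => (PySem.Dict.counter key.toList).getD c 0)
        = (l.filter (fun c => decide (c < x))).map (fun c => (key.toList.count c : Int)) := by
      apply List.map_congr_left
      intro c _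
      rw [PySem.Dict.getD_counter]
    rw [hmap, pvSumCounts x key.toList l hnd (fun e he hlt => (hmem e).mpr he)]
    ring
  rw [pvResFold _ key.toList [] [] PySem.Dict.empty (by intro c; simp)]
  rw [List.nil_append]
  apply List.map_congr_left
  intro p hp
  rw [List.mem_range] at hp
  rw [List.nil_append, hbase (key.toList.getD p 'a')
    (by rw [List.getD_eq_getElem key.toList 'a' hp]; exact List.getElem_mem _)]
  unfold pvRk pvCntLt
  push_cast
  ring

-- ===== VERDICT (by name: the statement is the Claim_ definition above) =====
theorem rangCleTransRect_spec : Claim_equal_rangCleTransRect := by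
  intro key _
  unfold Spec_rangCleTransRect
  rw [pvA_eq, pvB_eq]
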